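-- pv_equiv track=rewrite | github.com/esaul314/chunkify | pdf_chunker/page_artifacts.py | _restore_colon_suffix_case
-- ===== SOURCE A (Python) =====
-- from typing import Iterable, Optional, Sequence, TYPE_CHECKING
--
-- def _first_alpha_after(text: str, start: int) -> Optional[int]:
--     """Return the index of the first alphabetic character in ``text`` after ``start``."""
--
--     return next((idx for idx, ch in enumerate(text[start:], start=start) if ch.isalpha()), None)
--
-- def _restore_colon_suffix_case(original: str, cleaned: str) -> str:
--     """Uppercase colon suffix initials when the original text used title casing."""
--
--     if ":" not in original or ":" not in cleaned:
--         return cleaned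
--
--     orig_colons = (idx for idx, ch in enumerate(original) if ch == ":")
--     cleaned_colons = (idx for idx, ch in enumerate(cleaned) if ch == ":")
--     chars = list(cleaned)
--
--     for orig_idx, cleaned_idx in zip(orig_colons, cleaned_colons):
--         orig_alpha = _first_alpha_after(original, orig_idx + 1)
--         cleaned_alpha = _first_alpha_after(chars, cleaned_idx + 1)
--         if (
--             orig_alpha is None
--             or cleaned_alpha is None
--             or not original[orig_alpha].isupper()
--             or not chars[cleaned_alpha].islower()
--         ):
--             continue
--         chars[cleaned_alpha] = chars[cleaned_alpha].upper()
--
--     return "".join(chars)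
-- ===== SOURCE B (Python) =====
-- def _restore_colon_suffix_case(original: str, cleaned: str) -> str:
--     """Uppercase colon suffix initials when the original text used title casing.
--
--     One backward pass precomputes, for each position, the index of the next
--     alphabetic character, so each colon is handled in O(1)."""
--
--     if ":" not in original or ":" not in cleaned:
--         return cleaned
--
--     def next_alpha(s: str) -> list:
--         nxt = [None] * (len(s) + 1)
--         for i in range(len(s) - 1, -1, -1):
--             nxt[i] = i if s[i].isalpha() else nxt[i + 1]
--         return nxt
--
--     no = next_alpha(original)
--     nc = next_alpha(cleaned)
--     orig_colons = [idx for idx, ch in enumerate(original) if ch == ":"]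
--     cleaned_colons = [idx for idx, ch in enumerate(cleaned) if ch == ":"]
--
--     marks = set()
--     for orig_idx, cleaned_idx in zip(orig_colons, cleaned_colons):
--         oa = no[orig_idx + 1]
--         ca = nc[cleaned_idx + 1]
--         if oa is not None and ca is not None and original[oa].isupper() and cleaned[ca].islower():
--             marks.add(ca)
--
--     return "".join(ch.upper() if i in marks else ch for i, ch in enumerate(cleaned))
-- ===== Notes on version B (the rewrite author's own statement) =====
-- stated objective: faster
-- what changed: Instead of rescanning the mutated character list after every colon, B precomputes next-alphabetic-index tables for both strings in one backward pass, collects the positions to uppercase in a set, and rebuilds the string in a single final pass.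
import Mathlib
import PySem

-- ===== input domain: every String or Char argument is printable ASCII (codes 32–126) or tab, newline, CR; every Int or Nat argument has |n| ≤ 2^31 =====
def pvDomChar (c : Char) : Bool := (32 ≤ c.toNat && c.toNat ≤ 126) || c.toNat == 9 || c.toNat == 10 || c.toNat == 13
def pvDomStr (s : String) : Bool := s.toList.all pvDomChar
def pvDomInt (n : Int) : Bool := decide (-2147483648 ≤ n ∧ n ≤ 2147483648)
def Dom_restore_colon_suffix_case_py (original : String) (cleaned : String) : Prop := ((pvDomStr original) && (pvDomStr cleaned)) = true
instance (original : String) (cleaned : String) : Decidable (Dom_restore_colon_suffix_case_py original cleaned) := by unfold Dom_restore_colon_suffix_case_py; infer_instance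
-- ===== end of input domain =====

-- B uppercases via a precomputed next-alphabetic-index table and a mark set instead of
-- rescanning the (mutated) character list after every colon.

-- ===== PORT A =====

-- '[idx for idx, ch in enumerate(s) if ch == ":"]' (identical comprehension in both Pythons)
def pvColonIdxs : List Char → Nat → List Nat
  | [], _ => []
  | ch :: rest, i => if ch = ':' then i :: pvColonIdxs rest (i + 1) else pvColonIdxs rest (i + 1)

-- _first_alpha_after: first alphabetic index in text at or after start
def pvFirstAlphaAfter (l : List Char) (start : Nat) : Option Nat :=
  (List.findIdx? PySem.Chars.isalpha (l.drop start)).map (· + start)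

-- the 'for orig_idx, cleaned_idx in zip(...)' loop, mutating chars
def pvALoop (orig : List Char) : List (Nat × Nat) → List Char → List Char
  | [], chars => chars
  | (oi, ci) :: rest, chars =>
    match pvFirstAlphaAfter orig (oi + 1), pvFirstAlphaAfter chars (ci + 1) with
    | some oa, some ca =>
      if PySem.Chars.isupper (orig.getD oa ' ') && PySem.Chars.islower (chars.getD ca ' ') then
        pvALoop orig rest (chars.set ca (PySem.Chars.upperChar (chars.getD ca ' ')))
      else
        pvALoop orig rest chars
    | _, _ => pvALoop orig rest chars

def restore_colon_suffix_case_py (original : String) (cleaned : String) : String :=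
  if !(PySem.Chars.isIn [':'] original.toList) || !(PySem.Chars.isIn [':'] cleaned.toList) then
    cleaned
  else
    String.ofList (pvALoop original.toList
      ((pvColonIdxs original.toList 0).zip (pvColonIdxs cleaned.toList 0)) cleaned.toList)

-- ===== PORT B =====

-- next_alpha: backward pass; entry i = index of first alphabetic char at or after i
def pvNextAlpha : List Char → Nat → List (Option Nat)
  | [], _ => [none]
  | ch :: rest, i =>
    let acc := pvNextAlpha rest (i + 1)
    (if PySem.Chars.isalpha ch then some i else acc.headD none) :: acc

-- the marks-collecting loop over the zipped colon positions
def pvBCollect (orig clean : List Char) (no nc : List (Option Nat)) :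
    List (Nat × Nat) → PySem.Set Nat → PySem.Set Nat
  | [], s => s
  | (oi, ci) :: rest, s =>
    match no.getD (oi + 1) none, nc.getD (ci + 1) none with
    | some oa, some ca =>
      if PySem.Chars.isupper (orig.getD oa ' ') && PySem.Chars.islower (clean.getD ca ' ') then
        pvBCollect orig clean no nc rest (PySem.Set.add s ca)
      else
        pvBCollect orig clean no nc rest s
    | _, _ => pvBCollect orig clean no nc rest s

-- ''.join(ch.upper() if i in marks else ch for i, ch in enumerate(cleaned))
def pvMark (marks : List Nat) (cs : List Char) : List Char :=
  cs.mapIdx (fun i ch => if marks.contains i then PySem.Chars.upperChar ch else ch)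

def restore_colon_suffix_case_py_alt (original : String) (cleaned : String) : String :=
  if !(PySem.Chars.isIn [':'] original.toList) || !(PySem.Chars.isIn [':'] cleaned.toList) then
    cleaned
  else
    String.ofList (pvMark
      (pvBCollect original.toList cleaned.toList (pvNextAlpha original.toList 0)
        (pvNextAlpha cleaned.toList 0)
        ((pvColonIdxs original.toList 0).zip (pvColonIdxs cleaned.toList 0)) PySem.Set.empty)
      cleaned.toList)

-- ===== PRECONDITION & SPEC =====
def Spec_restore_colon_suffix_case_py (original : String) (cleaned : String) (out : String) : Prop := out = restore_colon_suffix_case_py_alt original cleaned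
instance (original : String) (cleaned : String) (out : String) : Decidable (Spec_restore_colon_suffix_case_py original cleaned out) := by unfold Spec_restore_colon_suffix_case_py; infer_instance

-- ===== CLAIM (what is proved, stated in full; the proofs are below) =====
def Claim_equal_restore_colon_suffix_case_py : Prop := ∀ (original : String) (cleaned : String), Dom_restore_colon_suffix_case_py original cleaned → Spec_restore_colon_suffix_case_py original cleaned (restore_colon_suffix_case_py original cleaned)

-- ===== LEMMAS AND PROOFS =====

theorem char_toNat_ofNat {n : Nat} (h : n < 55296) : (Char.ofNat n).toNat = n := by
  unfold Char.ofNat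
  rw [dif_pos (Or.inl h)]
  rfl

theorem islower_iff (ch : Char) :
    PySem.Chars.islower ch = true ↔ 97 ≤ ch.toNat ∧ ch.toNat ≤ 122 := by
  simp only [PySem.Chars.islower, Bool.and_eq_true, decide_eq_true_eq, Char.le_def,
    UInt32.le_iff_toNat_le, Char.toNat_val]
  have : 'a'.toNat = 97 := rfl
  have : 'z'.toNat = 122 := rfl
  omega

theorem isupper_iff (ch : Char) :
    PySem.Chars.isupper ch = true ↔ 65 ≤ ch.toNat ∧ ch.toNat ≤ 90 := by
  simp only [PySem.Chars.isupper, Bool.and_eq_true, decide_eq_true_eq, Char.le_def,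
    UInt32.le_iff_toNat_le, Char.toNat_val]
  have : 'A'.toNat = 65 := rfl
  have : 'Z'.toNat = 90 := rfl
  omega

theorem upperChar_toNat_of_islower (ch : Char) (h : PySem.Chars.islower ch = true) :
    (PySem.Chars.upperChar ch).toNat = ch.toNat - 32 := by
  rw [PySem.Chars.upperChar, if_pos h]
  exact char_toNat_ofNat (by rw [islower_iff] at h; omega)

theorem isalpha_upperChar_of_islower (ch : Char) (h : PySem.Chars.islower ch = true) :
    PySem.Chars.isalpha (PySem.Chars.upperChar ch) = true := by
  have hv := upperChar_toNat_of_islower ch h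
  rw [islower_iff] at h
  simp only [PySem.Chars.isalpha, Bool.or_eq_true, isupper_iff, islower_iff, hv]
  omega

theorem islower_upperChar_of_islower (ch : Char) (h : PySem.Chars.islower ch = true) :
    PySem.Chars.islower (PySem.Chars.upperChar ch) = false := by
  have hv := upperChar_toNat_of_islower ch h
  rw [islower_iff] at h
  rw [Bool.eq_false_iff]
  intro hc
  rw [islower_iff, hv] at hc
  omega

theorem isalpha_of_islower (ch : Char) (h : PySem.Chars.islower ch = true) :
    PySem.Chars.isalpha ch = true := by
  simp [PySem.Chars.isalpha, h]

-- the table pvNextAlpha computes exactly _first_alpha_after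
theorem pvNextAlpha_getD (l : List Char) : ∀ (i k : Nat),
    (pvNextAlpha l i).getD k none =
      (List.findIdx? PySem.Chars.isalpha (l.drop k)).map (· + (i + k)) := by
  induction l with
  | nil =>
    intro i k
    cases k <;> simp [pvNextAlpha]
  | cons ch rest ih =>
    intro i k
    cases k with
    | zero =>
      rw [List.drop_zero, List.findIdx?_cons]
      cases hch : PySem.Chars.isalpha ch with
      | true => simp [pvNextAlpha, hch]
      | false =>
        have hh : (pvNextAlpha rest (i + 1)).headD none = (pvNextAlpha rest (i + 1)).getD 0 none := by
          cases pvNextAlpha rest (i + 1) <;> rfl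
        simp only [pvNextAlpha, List.getD_cons_zero, hch, Bool.false_eq_true, if_false]
        rw [hh, ih (i + 1) 0]
        simp only [List.drop_zero, Option.map_map]
        cases List.findIdx? PySem.Chars.isalpha rest <;> simp <;> omega
    | succ k' =>
      simp only [pvNextAlpha, List.getD_cons_succ, List.drop_succ_cons]
      rw [ih (i + 1) k']
      have : i + 1 + k' = i + (k' + 1) := by omega
      rw [this]

theorem pvNextAlpha_getD_zero (l : List Char) (k : Nat) :
    (pvNextAlpha l 0).getD k none = pvFirstAlphaAfter l k := by
  rw [pvNextAlpha_getD l 0 k, pvFirstAlphaAfter]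
  simp

-- invariant for the mark set: every marked index holds a lowercase char of cs
def pvInv (S : List Nat) (cs : List Char) : Prop :=
  ∀ i, S.contains i = true → PySem.Chars.islower (cs.getD i ' ') = true

theorem map_isalpha_pvMark (S : List Nat) (cs : List Char) (hS : pvInv S cs) :
    (pvMark S cs).map PySem.Chars.isalpha = cs.map PySem.Chars.isalpha := by
  apply List.ext_getElem
  · simp [pvMark]
  · intro i h1 h2
    simp only [pvMark, List.getElem_map, List.getElem_mapIdx]
    by_cases hm : S.contains i
    · have hil : i < cs.length := by simpa using h2
      have hl : PySem.Chars.islower (cs[i]'hil) = true := by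
        have hx := hS i hm
        rwa [List.getD_eq_getElem cs ' ' hil] at hx
      simp only [if_pos hm, isalpha_upperChar_of_islower _ hl, isalpha_of_islower _ hl]
    · rw [if_neg hm]

theorem pvFirstAlphaAfter_pvMark (S : List Nat) (cs : List Char) (hS : pvInv S cs) (k : Nat) :
    pvFirstAlphaAfter (pvMark S cs) k = pvFirstAlphaAfter cs k := by
  have hmap : ((pvMark S cs).drop k).map PySem.Chars.isalpha = (cs.drop k).map PySem.Chars.isalpha := by
    rw [List.map_drop, List.map_drop, map_isalpha_pvMark S cs hS]
  unfold pvFirstAlphaAfter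
  have e1 : List.findIdx? PySem.Chars.isalpha ((pvMark S cs).drop k)
      = List.findIdx? id (((pvMark S cs).drop k).map PySem.Chars.isalpha) := by
    rw [List.findIdx?_map]; rfl
  have e2 : List.findIdx? PySem.Chars.isalpha (cs.drop k)
      = List.findIdx? id ((cs.drop k).map PySem.Chars.isalpha) := by
    rw [List.findIdx?_map]; rfl
  rw [e1, e2, hmap]

theorem pvMark_getD (S : List Nat) (cs : List Char) (i : Nat) (h : i < cs.length) :
    (pvMark S cs).getD i ' ' =
      if S.contains i then PySem.Chars.upperChar (cs.getD i ' ') else cs.getD i ' ' := by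
  have hm : i < (pvMark S cs).length := by simpa [pvMark] using h
  rw [List.getD_eq_getElem cs ' ' h, List.getD_eq_getElem (pvMark S cs) ' ' hm]
  simp [pvMark]

theorem pvMark_nil (cs : List Char) : pvMark [] cs = cs := by
  apply List.ext_getElem
  · simp [pvMark]
  · intro i h1 h2
    simp [pvMark]

theorem pvMark_set (S : List Nat) (cs : List Char) (ca : Nat) (h : ca < cs.length) :
    (pvMark S cs).set ca (PySem.Chars.upperChar (cs.getD ca ' ')) = pvMark (S ++ [ca]) cs := by
  apply List.ext_getElem
  · simp [pvMark]
  · intro i h1 h2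
    rw [List.getElem_set]
    by_cases hi : ca = i
    · subst hi
      rw [if_pos rfl]
      rw [List.getD_eq_getElem cs ' ' h]
      simp [pvMark, List.getElem_mapIdx]
    · rw [if_neg hi]
      simp only [pvMark, List.getElem_mapIdx, List.contains_append, List.contains_cons,
        List.contains_nil, Bool.or_false]
      have hne : ¬ i = ca := fun e => hi e.symm
      simp [hne]

theorem pvLoop_eq (o cs : List Char) (pairs : List (Nat × Nat)) (S : List Nat)
    (hS : pvInv S cs) :
    pvALoop o pairs (pvMark S cs) =
      pvMark (pvBCollect o cs (pvNextAlpha o 0) (pvNextAlpha cs 0) pairs S) cs := by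
  induction pairs generalizing S hS with
  | nil => simp [pvALoop, pvBCollect]
  | cons pr rest ih =>
    obtain ⟨oi, ci⟩ := pr
    simp only [pvALoop, pvBCollect]
    rw [pvFirstAlphaAfter_pvMark S cs hS, pvNextAlpha_getD_zero, pvNextAlpha_getD_zero]
    cases hoa : pvFirstAlphaAfter o (oi + 1) with
    | none => exact ih S hS
    | some oa =>
      cases hca : pvFirstAlphaAfter cs (ci + 1) with
      | none => exact ih S hS
      | some ca =>
        have hlen : ca < cs.length := by
          unfold pvFirstAlphaAfter at hca
          cases hf : List.findIdx? PySem.Chars.isalpha (cs.drop (ci + 1)) with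
          | none => rw [hf] at hca; simp at hca
          | some k2 =>
            rw [hf] at hca
            simp only [Option.map_some, Option.some.injEq] at hca
            rw [List.findIdx?_eq_some_iff_findIdx_eq] at hf
            have hk := hf.1
            simp only [List.length_drop] at hk
            omega
        dsimp only
        rw [pvMark_getD S cs ca hlen]
        by_cases hm : S.contains ca
        · have hlow : PySem.Chars.islower (cs.getD ca ' ') = true := hS ca hm
          rw [if_pos hm, islower_upperChar_of_islower _ hlow, Bool.and_false, if_neg (by simp)]
          have hadd : PySem.Set.add S ca = S := by
            simp only [PySem.Set.add, PySem.Set.contains]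
            rw [if_pos hm]
          rw [hlow, Bool.and_true]
          cases hup : PySem.Chars.isupper (o.getD oa ' ') with
          | false => rw [if_neg (by simp)]; exact ih S hS
          | true => rw [if_pos rfl, hadd]; exact ih S hS
        · rw [if_neg hm]
          cases hcond : (PySem.Chars.isupper (o.getD oa ' ') && PySem.Chars.islower (cs.getD ca ' ')) with
          | false =>
            rw [if_neg (by simp)]
            exact ih S hS
          | true =>
            rw [if_pos rfl, pvMark_set S cs ca hlen]
            have hadd : PySem.Set.add S ca = S ++ [ca] := by
              simp only [PySem.Set.add, PySem.Set.contains]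
              rw [if_neg hm]
            rw [hadd]
            apply ih
            intro i hi
            have hmem : i ∈ S ++ [ca] := by simpa using hi
            rcases List.mem_append.mp hmem with h | h
            · exact hS i (by simpa using h)
            · have : i = ca := by simpa using h
              subst this
              exact (Bool.and_eq_true _ _).mp hcond |>.2

-- ===== VERDICT (by name: the statement is the Claim_ definition above) =====
theorem restore_colon_suffix_case_py_spec : Claim_equal_restore_colon_suffix_case_py := by
  intro original cleaned _
  unfold Spec_restore_colon_suffix_case_py
  unfold restore_colon_suffix_case_py restore_colon_suffix_case_py_alt
  cases hb : (!(PySem.Chars.isIn [':'] original.toList) || !(PySem.Chars.isIn [':'] cleaned.toList)) with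
  | true => simp only [if_true]
  | false =>
    simp only [Bool.false_eq_true, if_false]
    have h := pvLoop_eq original.toList cleaned.toList
      ((pvColonIdxs original.toList 0).zip (pvColonIdxs cleaned.toList 0)) []
      (by intro i hi; simp at hi)
    rw [pvMark_nil] at h
    rw [h]
    rfl
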